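-- pv_equiv track=rewrite | github.com/ch3mo/Pirate_Launcher | pirate_launcher.py | _secret_achievement_satisfied
-- ===== SOURCE A (Python) =====
-- def _secret_achievement_satisfied(kind, need, counts, seconds):
--     if kind == "triple_platform":
--         return all(counts[p] >= 1 for p in ("Pirated", "Steam", "Xbox"))
--     if kind == "pirate_count":
--         return counts["Pirated"] >= need
--     if kind == "steam_count":
--         return counts["Steam"] >= need
--     if kind == "xbox_count":
--         return counts["Xbox"] >= need
--     if kind == "pirated_hours":
--         return seconds["Pirated"] >= need
--     if kind == "steam_hours":
--         return seconds["Steam"] >= need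
--     if kind == "xbox_hours":
--         return seconds["Xbox"] >= need
--     return False
-- ===== SOURCE B (Python) =====
-- def _secret_achievement_satisfied(kind, need, counts, seconds):
--     # Parse the kind string: split off the metric after the last "_" and map the
--     # platform prefix to its dict key, instead of enumerating seven branches.
--     head, sep, metric = kind.rpartition("_")
--     if not sep:
--         head = metric
--     if head == "triple" and metric == "platform":
--         return all(counts[p] >= 1 for p in ("Pirated", "Steam", "Xbox"))
--     if metric == "count":
--         plat = {"pirate": "Pirated", "steam": "Steam", "xbox": "Xbox"}.get(head)
--         if plat is not None:
--             return counts[plat] >= need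
--     elif metric == "hours":
--         plat = {"pirated": "Pirated", "steam": "Steam", "xbox": "Xbox"}.get(head)
--         if plat is not None:
--             return seconds[plat] >= need
--     return False
-- ===== Notes on version B (the rewrite author's own statement) =====
-- stated objective: alternative
-- what changed: Instead of a seven-way if-chain on whole kind strings, B parses kind with rpartition at the last underscore into (platform-prefix, metric), selects counts vs seconds by the metric and maps the prefix to its dict key, so the branching structure is string decomposition rather than literal enumeration.
import Mathlib
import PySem

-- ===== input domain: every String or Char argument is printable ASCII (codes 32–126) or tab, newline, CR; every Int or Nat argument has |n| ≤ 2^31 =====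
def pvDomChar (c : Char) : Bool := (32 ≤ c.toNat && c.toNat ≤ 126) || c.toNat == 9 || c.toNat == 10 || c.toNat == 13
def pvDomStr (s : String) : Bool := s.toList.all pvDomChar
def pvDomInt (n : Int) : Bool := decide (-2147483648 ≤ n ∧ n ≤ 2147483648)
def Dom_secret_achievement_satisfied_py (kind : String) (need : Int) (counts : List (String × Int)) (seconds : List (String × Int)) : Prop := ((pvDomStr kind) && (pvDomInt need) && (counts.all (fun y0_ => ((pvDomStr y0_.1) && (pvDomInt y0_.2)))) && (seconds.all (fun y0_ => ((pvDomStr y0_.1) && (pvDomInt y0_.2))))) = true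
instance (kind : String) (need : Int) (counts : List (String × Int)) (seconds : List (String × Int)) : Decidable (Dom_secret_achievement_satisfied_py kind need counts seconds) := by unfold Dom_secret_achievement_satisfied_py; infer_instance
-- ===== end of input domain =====

-- ===== PORT A =====
-- B parses the kind string (rpartition at the last '_', platform prefix mapped to its dict key)
-- instead of A's seven-way if-chain; objective: alternative decomposition, same cost.
-- Python dict lookup d[k]: first match in the association list; none = KeyError (excluded by Pre_, ports read 0 there).
def pvLookup? (d : List (String × Int)) (k : String) : Option Int :=
  (d.find? (fun p => p.1 == k)).map (·.2)

def pvGet0 (d : List (String × Int)) (k : String) : Int :=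
  (pvLookup? d k).getD 0

def secret_achievement_satisfied_py (kind : String) (need : Int) (counts : List (String × Int)) (seconds : List (String × Int)) : Bool :=
  if kind = "triple_platform" then
    ["Pirated", "Steam", "Xbox"].all (fun p => decide (pvGet0 counts p ≥ 1))
  else if kind = "pirate_count" then decide (pvGet0 counts "Pirated" ≥ need)
  else if kind = "steam_count" then decide (pvGet0 counts "Steam" ≥ need)
  else if kind = "xbox_count" then decide (pvGet0 counts "Xbox" ≥ need)
  else if kind = "pirated_hours" then decide (pvGet0 seconds "Pirated" ≥ need)
  else if kind = "steam_hours" then decide (pvGet0 seconds "Steam" ≥ need)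
  else if kind = "xbox_hours" then decide (pvGet0 seconds "Xbox" ≥ need)
  else false

-- ===== PORT B =====
-- Python's s.rpartition("_"): (before-last-'_', sep-found?, after-last-'_'); exact hand port
-- (scan the reversed character list up to the first '_').
def pvRPartition (s : String) : String × Bool × String :=
  match s.toList.reverse.span (fun c => c != '_') with
  | (suf, []) => ("", false, String.ofList suf.reverse)
  | (suf, _ :: pre) => (String.ofList pre.reverse, true, String.ofList suf.reverse)

-- the {prefix: key}.get(head) lookup of Source B
def pvPlatGet? (d : List (String × String)) (k : String) : Option String :=
  (d.find? (fun p => p.1 == k)).map (·.2)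

def secret_achievement_satisfied_py_alt (kind : String) (need : Int) (counts : List (String × Int)) (seconds : List (String × Int)) : Bool :=
  match pvRPartition kind with
  | (h0, sep, metric) =>
    let head := if sep then h0 else metric
    if head == "triple" && metric == "platform" then
      ["Pirated", "Steam", "Xbox"].all (fun p => decide (pvGet0 counts p ≥ 1))
    else if metric == "count" then
      match pvPlatGet? [("pirate", "Pirated"), ("steam", "Steam"), ("xbox", "Xbox")] head with
      | some plat => decide (pvGet0 counts plat ≥ need)
      | none => false
    else if metric == "hours" then
      match pvPlatGet? [("pirated", "Pirated"), ("steam", "Steam"), ("xbox", "Xbox")] head with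
      | some plat => decide (pvGet0 seconds plat ≥ need)
      | none => false
    else false

-- ===== PRECONDITION & SPEC =====
-- Pre_ excludes exactly the inputs where A raises KeyError: the branch selected by kind must find
-- its key(s) in the dict it reads (for triple_platform only as far as the short-circuiting all() reaches).
def Pre_secret_achievement_satisfied_py (kind : String) (need : Int) (counts : List (String × Int)) (seconds : List (String × Int)) : Prop :=
  (kind = "triple_platform" →
      (pvLookup? counts "Pirated").isSome ∧
      (1 ≤ pvGet0 counts "Pirated" → (pvLookup? counts "Steam").isSome ∧
        (1 ≤ pvGet0 counts "Steam" → (pvLookup? counts "Xbox").isSome))) ∧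
  (kind = "pirate_count" → (pvLookup? counts "Pirated").isSome) ∧
  (kind = "steam_count" → (pvLookup? counts "Steam").isSome) ∧
  (kind = "xbox_count" → (pvLookup? counts "Xbox").isSome) ∧
  (kind = "pirated_hours" → (pvLookup? seconds "Pirated").isSome) ∧
  (kind = "steam_hours" → (pvLookup? seconds "Steam").isSome) ∧
  (kind = "xbox_hours" → (pvLookup? seconds "Xbox").isSome)
instance (kind : String) (need : Int) (counts : List (String × Int)) (seconds : List (String × Int)) : Decidable (Pre_secret_achievement_satisfied_py kind need counts seconds) := by unfold Pre_secret_achievement_satisfied_py; infer_instance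

def pvWitness_secret_achievement_satisfied_py : String × Int × (List (String × Int)) × (List (String × Int)) :=
  ("pirate_count", 1, [("Pirated", 2)], [])

def Spec_secret_achievement_satisfied_py (kind : String) (need : Int) (counts : List (String × Int)) (seconds : List (String × Int)) (out : Bool) : Prop := out = secret_achievement_satisfied_py_alt kind need counts seconds
instance (kind : String) (need : Int) (counts : List (String × Int)) (seconds : List (String × Int)) (out : Bool) : Decidable (Spec_secret_achievement_satisfied_py kind need counts seconds out) := by unfold Spec_secret_achievement_satisfied_py; infer_instance

-- ===== CLAIM (what is proved, stated in full; the proofs are below) =====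
def Claim_equal_secret_achievement_satisfied_py : Prop := ∀ (kind : String) (need : Int) (counts : List (String × Int)) (seconds : List (String × Int)), Dom_secret_achievement_satisfied_py kind need counts seconds → Pre_secret_achievement_satisfied_py kind need counts seconds → Spec_secret_achievement_satisfied_py kind need counts seconds (secret_achievement_satisfied_py kind need counts seconds)

-- ===== LEMMAS AND PROOFS =====
theorem pvWitness_ok : Dom_secret_achievement_satisfied_py (pvWitness_secret_achievement_satisfied_py.1) (pvWitness_secret_achievement_satisfied_py.2.1) (pvWitness_secret_achievement_satisfied_py.2.2.1) (pvWitness_secret_achievement_satisfied_py.2.2.2) ∧ Pre_secret_achievement_satisfied_py (pvWitness_secret_achievement_satisfied_py.1) (pvWitness_secret_achievement_satisfied_py.2.1) (pvWitness_secret_achievement_satisfied_py.2.2.1) (pvWitness_secret_achievement_satisfied_py.2.2.2) := by decide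

-- If rpartition found a separator, the input string is exactly head ++ "_" ++ tail.
theorem pvRPartition_sep (s h0 m : String) (h : pvRPartition s = (h0, true, m)) :
    s = h0 ++ "_" ++ m := by
  unfold pvRPartition at h
  rw [List.span_eq_takeWhile_dropWhile] at h
  rcases hd : s.toList.reverse.dropWhile (fun c => c != '_') with _ | ⟨c, pre⟩
  · rw [hd] at h; simp at h
  · rw [hd] at h
    have hc' : c = '_' := by
      have h2 : s.toList.reverse.dropWhile (fun c => c != '_') ≠ [] := by simp [hd]
      have := List.head_dropWhile_not (l := s.toList.reverse) (fun c => c != '_') h2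
      simpa [hd] using this
    obtain ⟨hh0, hm⟩ : String.ofList pre.reverse = h0 ∧
        String.ofList ((s.toList.reverse.takeWhile (fun c => c != '_')).reverse) = m := by
      simpa using h
    have hcat := List.takeWhile_append_dropWhile (p := fun c => c != '_') (l := s.toList.reverse)
    rw [hd] at hcat
    apply String.toList_inj.mp
    have hs : s.toList = pre.reverse ++ c :: (s.toList.reverse.takeWhile (fun c => c != '_')).reverse := by
      have := congrArg List.reverse hcat
      simpa using this.symm
    rw [hs, ← hh0, ← hm, hc']
    simp

set_option maxRecDepth 100000 in
theorem alt_other (kind : String) (need : Int) (counts : List (String × Int)) (seconds : List (String × Int))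
    (h1 : kind ≠ "triple_platform") (h2 : kind ≠ "pirate_count") (h3 : kind ≠ "steam_count")
    (h4 : kind ≠ "xbox_count") (h5 : kind ≠ "pirated_hours") (h6 : kind ≠ "steam_hours")
    (h7 : kind ≠ "xbox_hours") :
    secret_achievement_satisfied_py_alt kind need counts seconds = false := by
  rcases hrp : pvRPartition kind with ⟨p0, sep, m⟩
  cases sep with
  | false =>
    simp only [secret_achievement_satisfied_py_alt, hrp, Bool.false_eq_true, if_false]
    split_ifs with hA hB hC
    · simp at hA
      exact absurd (hA.1.symm.trans hA.2) (by decide)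
    · simp at hB; subst hB; rfl
    · simp at hC; subst hC; rfl
    · rfl
  | true =>
    have hk : kind = p0 ++ "_" ++ m := pvRPartition_sep kind p0 m hrp
    simp only [secret_achievement_satisfied_py_alt, hrp, if_true]
    split_ifs with hA hB hC
    · simp at hA
      obtain ⟨e1, e2⟩ := hA; subst e1; subst e2
      exact absurd (hk.trans (by decide)) h1
    · simp at hB; subst hB
      by_cases e1 : p0 = "pirate"
      · subst e1; exact absurd (hk.trans (by decide)) h2
      by_cases e2 : p0 = "steam"
      · subst e2; exact absurd (hk.trans (by decide)) h3
      by_cases e3 : p0 = "xbox"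
      · subst e3; exact absurd (hk.trans (by decide)) h4
      · simp [pvPlatGet?, List.find?, beq_eq_false_iff_ne.mpr (Ne.symm e1),
          beq_eq_false_iff_ne.mpr (Ne.symm e2), beq_eq_false_iff_ne.mpr (Ne.symm e3)]
    · simp at hC; subst hC
      by_cases e1 : p0 = "pirated"
      · subst e1; exact absurd (hk.trans (by decide)) h5
      by_cases e2 : p0 = "steam"
      · subst e2; exact absurd (hk.trans (by decide)) h6
      by_cases e3 : p0 = "xbox"
      · subst e3; exact absurd (hk.trans (by decide)) h7
      · simp [pvPlatGet?, List.find?, beq_eq_false_iff_ne.mpr (Ne.symm e1),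
          beq_eq_false_iff_ne.mpr (Ne.symm e2), beq_eq_false_iff_ne.mpr (Ne.symm e3)]
    · rfl

-- ===== VERDICT (by name: the statement is the Claim_ definition above) =====
set_option maxRecDepth 100000 in
theorem secret_achievement_satisfied_py_spec : Claim_equal_secret_achievement_satisfied_py := by
  intro kind need counts seconds _ _
  unfold Spec_secret_achievement_satisfied_py
  by_cases h1 : kind = "triple_platform"
  · subst h1
    have e : pvRPartition "triple_platform" = ("triple", true, "platform") := by decide
    simp [secret_achievement_satisfied_py, secret_achievement_satisfied_py_alt, e]
  by_cases h2 : kind = "pirate_count"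
  · subst h2
    have e : pvRPartition "pirate_count" = ("pirate", true, "count") := by decide
    simp [secret_achievement_satisfied_py, secret_achievement_satisfied_py_alt, e, pvPlatGet?, List.find?]
  by_cases h3 : kind = "steam_count"
  · subst h3
    have e : pvRPartition "steam_count" = ("steam", true, "count") := by decide
    simp [secret_achievement_satisfied_py, secret_achievement_satisfied_py_alt, e, pvPlatGet?, List.find?]
  by_cases h4 : kind = "xbox_count"
  · subst h4
    have e : pvRPartition "xbox_count" = ("xbox", true, "count") := by decide
    simp [secret_achievement_satisfied_py, secret_achievement_satisfied_py_alt, e, pvPlatGet?, List.find?]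
  by_cases h5 : kind = "pirated_hours"
  · subst h5
    have e : pvRPartition "pirated_hours" = ("pirated", true, "hours") := by decide
    simp [secret_achievement_satisfied_py, secret_achievement_satisfied_py_alt, e, pvPlatGet?, List.find?]
  by_cases h6 : kind = "steam_hours"
  · subst h6
    have e : pvRPartition "steam_hours" = ("steam", true, "hours") := by decide
    simp [secret_achievement_satisfied_py, secret_achievement_satisfied_py_alt, e, pvPlatGet?, List.find?]
  by_cases h7 : kind = "xbox_hours"
  · subst h7
    have e : pvRPartition "xbox_hours" = ("xbox", true, "hours") := by decide
    simp [secret_achievement_satisfied_py, secret_achievement_satisfied_py_alt, e, pvPlatGet?, List.find?]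
  rw [alt_other kind need counts seconds h1 h2 h3 h4 h5 h6 h7]
  simp [secret_achievement_satisfied_py, h1, h2, h3, h4, h5, h6, h7]
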